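-- pv_equiv track=rewrite | github.com/zikav1/EDAA80 | Python labs/edaa8x-labs/lab06/words.py | count_only
-- ===== SOURCE A (Python) =====
-- def count_only(words: list[str] , count_words: list[str]) -> dict[str, int]:
--
--     province_table = {}
--
--     for word in words:
--
--         if word in count_words:
--
--             if word in province_table:
--                 province_table[word] += 1
--
--             else:
--                 province_table[word] = 1
--
--
--     return province_table
-- ===== SOURCE B (Python) =====
-- def count_only(words: list[str], count_words: list[str]) -> dict[str, int]:
--     # Drive the computation from the distinct words (first-occurrence order):
--     # for each distinct word allowed by the filter, count its occurrences in words.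
--     allowed = set(count_words)
--     return {w: words.count(w) for w in dict.fromkeys(words) if w in allowed}
-- ===== Notes on version B (the rewrite author's own statement) =====
-- stated objective: faster
-- what changed: B abandons A's incremental counter built in one filtered pass: it deduplicates words (dict.fromkeys, first-occurrence order) and then, for each distinct allowed word, computes its total occurrences with words.count, building the result dict directly per key; the per-word linear scan of count_words disappears (set lookup) and words is rescanned only once per distinct key.
import Mathlib
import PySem

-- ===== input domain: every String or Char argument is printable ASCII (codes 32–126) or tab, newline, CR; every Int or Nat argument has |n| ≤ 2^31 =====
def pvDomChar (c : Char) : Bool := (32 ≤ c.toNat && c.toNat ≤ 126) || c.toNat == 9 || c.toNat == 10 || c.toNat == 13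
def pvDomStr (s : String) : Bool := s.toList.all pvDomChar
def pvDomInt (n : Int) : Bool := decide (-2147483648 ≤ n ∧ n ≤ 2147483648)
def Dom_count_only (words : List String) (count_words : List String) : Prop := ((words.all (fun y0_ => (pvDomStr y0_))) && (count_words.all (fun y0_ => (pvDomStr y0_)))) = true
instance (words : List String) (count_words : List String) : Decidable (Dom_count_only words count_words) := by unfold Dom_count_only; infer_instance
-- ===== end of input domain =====

-- B replaces A's incremental filtered counter by a dedup-then-count-per-key pass
-- (dict.fromkeys + words.count): an alternative decomposition of the same result.

-- ===== PORT A =====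
def count_only (words : List String) (count_words : List String) : List (String × Int) :=
  (words.foldl
    (fun table word =>
      if count_words.contains word then
        if table.contains word then table.modify word 0 (· + 1)
        else table.insert word 1
      else table)
    PySem.Dict.empty).items

-- ===== PORT B =====
-- allowed = set(count_words); {w: words.count(w) for w in dict.fromkeys(words) if w in allowed}
def count_only_alt (words : List String) (count_words : List String) : List (String × Int) :=
  let allowed := PySem.Set.ofList count_words
  ((PySem.Set.ofList words).filter (fun w => PySem.Set.contains allowed w)).map
    (fun w => (w, (words.count w : Int)))

-- ===== PRECONDITION & SPEC =====
def Spec_count_only (words : List String) (count_words : List String) (out : List (String × Int)) : Prop := out = count_only_alt words count_words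
instance (words : List String) (count_words : List String) (out : List (String × Int)) : Decidable (Spec_count_only words count_words out) := by unfold Spec_count_only; infer_instance

-- ===== CLAIM =====
def Claim_equal_count_only : Prop := ∀ (words : List String) (count_words : List String), Dom_count_only words count_words → Spec_count_only words count_words (count_only words count_words)

-- ===== LEMMAS AND PROOFS =====

-- A's conditional step equals Counter's step on words passing the filter.
theorem astep_eq_counter_step (d : PySem.Dict String Int) (w : String) :
    (if d.contains w then d.modify w 0 (· + 1) else d.insert w 1)
      = d.modify w 0 (· + 1) := by
  by_cases h : d.contains w
  · simp [h]
  · have h' : d.contains w = false := by simpa using h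
    simp [h', PySem.Dict.modify, PySem.Dict.getD_of_not_contains]

theorem afold_general (count_words ws : List String) :
    ∀ d : PySem.Dict String Int,
    ws.foldl
      (fun table word =>
        if count_words.contains word then
          if table.contains word then table.modify word 0 (· + 1)
          else table.insert word 1
        else table) d
    = ws.foldl
        (fun table word =>
          if count_words.contains word then table.modify word 0 (· + 1) else table) d := by
  induction ws with
  | nil => intro d; rfl
  | cons w ws ih =>
      intro d
      simp only [List.foldl_cons]
      by_cases h : count_words.contains w
      · rw [if_pos h, if_pos h, astep_eq_counter_step]; exact ih _
      · rw [if_neg h, if_neg h]; exact ih _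

-- A's whole fold is the Counter of the filtered word list.
theorem afold_eq_counter (words count_words : List String) :
    words.foldl
      (fun table word =>
        if count_words.contains word then
          if table.contains word then table.modify word 0 (· + 1)
          else table.insert word 1
        else table)
      PySem.Dict.empty
    = PySem.Dict.counter (words.filter (fun w => count_words.contains w)) := by
  rw [PySem.Dict.counter_eq_foldl, List.foldl_filter]
  exact afold_general count_words words PySem.Dict.empty

-- dedup commutes with filter.
theorem ofList_filter (p : String → Bool) (xs : List String) :
    PySem.Set.ofList (xs.filter p) = (PySem.Set.ofList xs).filter p := by
  induction xs with
  | nil => rfl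
  | cons x xs ih =>
      rw [List.filter_cons, PySem.Set.ofList_cons]
      by_cases h : p x
      · rw [if_pos h, PySem.Set.ofList_cons, ih, List.filter_cons, if_pos h,
          PySem.Set.discard, PySem.Set.discard, List.filter_filter, List.filter_filter]
        congr 1
        apply List.filter_congr
        intro y _
        cases p y <;> simp
      · rw [if_neg h, ih, List.filter_cons, if_neg h, PySem.Set.discard,
          List.filter_filter]
        apply List.filter_congr
        intro y _
        cases hy : p y
        · simp
        · have : y ≠ x := fun e => h (e ▸ hy)
          simp [this]

theorem count_filter_of_pos (p : String → Bool) (xs : List String) (k : String)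
    (hk : p k = true) : (xs.filter p).count k = xs.count k := by
  rw [List.count_filter]; simp [hk]

theorem count_only_eq_alt (words count_words : List String) :
    count_only words count_words = count_only_alt words count_words := by
  unfold count_only count_only_alt
  rw [afold_eq_counter, PySem.Dict.items_counter, ofList_filter]
  have hfilter : (PySem.Set.ofList words).filter (fun w => count_words.contains w)
      = (PySem.Set.ofList words).filter
          (fun w => PySem.Set.contains (PySem.Set.ofList count_words) w) := by
    apply List.filter_congr
    intro k _
    simp [PySem.Set.contains_eq_listContains, PySem.Set.mem_ofList]
  rw [hfilter]
  apply List.map_congr_left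
  intro k hk
  have hp : count_words.contains k = true := by
    have := (List.mem_filter.mp hk).2
    simpa [PySem.Set.contains_eq_listContains, PySem.Set.mem_ofList] using this
  rw [count_filter_of_pos _ _ _ hp]

-- ===== VERDICT =====
theorem count_only_spec : Claim_equal_count_only := by
  intro words count_words _
  exact count_only_eq_alt words count_words
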